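-- pv_equiv track=rewrite | github.com/Leahxuliu/Data-Structure-And-Algorithm | Python/Binary Search/5643. Ways to Split Array Into Three Subarrays.py | waysToSplit
-- ===== SOURCE A (Python) =====
-- from typing import List
--
-- def waysToSplit(nums: List[int]) -> int:
--     prefix = [nums[0]]
--     for i in nums[1:]:
--         prefix.append(prefix[-1] + i)
--
--     res = 0
--     for i in range(len(nums) - 2):
--         for j in range(i + 1, len(nums) - 1):
--             left = prefix[i]
--             mid = prefix[j] - left
--             right = prefix[-1] - left - mid
--             if left <= mid and mid <= right:
--                 res += 1
--     return res % (10 ** 9 + 7)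
-- ===== SOURCE B (Python) =====
-- from typing import List
--
-- def _bisect_left(a: List[int], x: int) -> int:
--     lo, hi = 0, len(a)
--     while lo < hi:
--         mid = (lo + hi) // 2
--         if a[mid] < x:
--             lo = mid + 1
--         else:
--             hi = mid
--     return lo
--
-- def _bisect_right(a: List[int], x: int) -> int:
--     lo, hi = 0, len(a)
--     while lo < hi:
--         mid = (lo + hi) // 2
--         if x < a[mid]:
--             hi = mid
--         else:
--             lo = mid + 1
--     return lo
--
-- def waysToSplit(nums: List[int]) -> int:
--     n = len(nums)
--     prefix = []
--     s = 0
--     for v in nums: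
--         s += v
--         prefix.append(s)
--     total = prefix[-1]
--     res = 0
--     seen = []  # sorted multiset of prefix[0..j-1]
--     for j in range(1, n - 1):
--         x = prefix[j - 1]
--         seen.insert(_bisect_left(seen, x), x)
--         lo = 2 * prefix[j] - total      # mid <= right  <=>  prefix[i] >= lo
--         hi = prefix[j] // 2             # left <= mid   <=>  prefix[i] <= hi
--         if lo <= hi:
--             res += _bisect_right(seen, hi) - _bisect_left(seen, lo)
--     return res % (10 ** 9 + 7)
-- ===== Notes on version B (the rewrite author's own statement) =====
-- stated objective: faster
-- what changed: Replaces A's double loop over all (i,j) split points by a single left-to-right pass that maintains a sorted list of the earlier prefix sums and, for each middle cut j, counts the valid left cuts i<j with a binary-searched range query (2*prefix[j]-total <= prefix[i] <= prefix[j]//2), which works for arbitrary (also negative) integers.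
import Mathlib
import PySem

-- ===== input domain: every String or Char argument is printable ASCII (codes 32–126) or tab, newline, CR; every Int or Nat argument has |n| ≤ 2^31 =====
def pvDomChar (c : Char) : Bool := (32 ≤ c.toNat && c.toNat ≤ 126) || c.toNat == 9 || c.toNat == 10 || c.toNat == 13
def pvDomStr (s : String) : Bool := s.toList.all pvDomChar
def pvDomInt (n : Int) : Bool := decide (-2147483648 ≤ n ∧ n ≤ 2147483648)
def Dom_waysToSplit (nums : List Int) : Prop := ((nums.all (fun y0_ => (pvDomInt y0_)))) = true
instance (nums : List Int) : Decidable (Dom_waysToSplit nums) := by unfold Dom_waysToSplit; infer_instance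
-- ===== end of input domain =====

-- B replaces A's O(n^2) double loop over split points by one pass that keeps a sorted list of the
-- earlier prefix sums and binary-searches, for each middle cut, the range of valid left cuts (faster).

-- ===== PORT A =====
def waysToSplit (nums : List Int) : Int :=
  -- prefix = [nums[0]] ; IndexError on [] (excluded by Pre_)
  let p0 : Int := (PySem.List.pyGet? nums 0).getD 0
  let pref := (PySem.List.slice nums (some 1) none).foldl
      (fun p i => p ++ [PySem.List.pyGetD p (-1) 0 + i]) [p0]
  let n : Int := PySem.List.len nums
  let res : Int := (PySem.List.pyRange 0 (n - 2) 1).foldl (fun res i =>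
      (PySem.List.pyRange (i + 1) (n - 1) 1).foldl (fun res j =>
        let left := PySem.List.pyGetD pref i 0
        let mid := PySem.List.pyGetD pref j 0 - left
        let right := PySem.List.pyGetD pref (-1) 0 - left - mid
        if left ≤ mid ∧ mid ≤ right then res + 1 else res) res) 0
  PySem.Int.mod res (10 ^ 9 + 7)

-- ===== PORT B =====
-- Source B's hand-written _bisect_left/_bisect_right are CPython's bisect algorithm verbatim;
-- they are ported as PySem.List.bisectLeft / bisectRight (the same binary-search loop).
def waysToSplit_alt (nums : List Int) : Int :=
  let n : Int := PySem.List.len nums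
  let ps := nums.foldl (fun (acc : Int × List Int) v =>
      (acc.1 + v, acc.2 ++ [acc.1 + v])) (0, [])
  let pref := ps.2
  let total := PySem.List.pyGetD pref (-1) 0   -- prefix[-1]; IndexError on [] (excluded by Pre_)
  let st := (PySem.List.pyRange 1 (n - 1) 1).foldl (fun (st : Int × List Int) j =>
      let x := PySem.List.pyGetD pref (j - 1) 0
      let seen := PySem.List.insert st.2 ((PySem.List.bisectLeft st.2 x : Nat) : Int) x
      let lo := 2 * PySem.List.pyGetD pref j 0 - total
      let hi := PySem.Int.floordiv (PySem.List.pyGetD pref j 0) 2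
      if lo ≤ hi then
        (st.1 + (((PySem.List.bisectRight seen hi : Nat) : Int)
                  - ((PySem.List.bisectLeft seen lo : Nat) : Int)), seen)
      else (st.1, seen)) ((0 : Int), ([] : List Int))
  PySem.Int.mod st.1 (10 ^ 9 + 7)

-- ===== PRECONDITION & SPEC =====
-- Pre_ excludes only the empty list, on which both Pythons raise IndexError (nums[0] / prefix[-1]).
def Pre_waysToSplit (nums : List Int) : Prop := nums ≠ []
instance (nums : List Int) : Decidable (Pre_waysToSplit nums) := by unfold Pre_waysToSplit; infer_instance
def pvWitness_waysToSplit : List Int := [1, 2, 2, 2, 5, 0]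

def Spec_waysToSplit (nums : List Int) (out : Int) : Prop := out = waysToSplit_alt nums
instance (nums : List Int) (out : Int) : Decidable (Spec_waysToSplit nums out) := by unfold Spec_waysToSplit; infer_instance

-- ===== CLAIM (what is proved, stated in full; the proofs are below) =====
def Claim_equal_waysToSplit : Prop := ∀ (nums : List Int), Dom_waysToSplit nums → Pre_waysToSplit nums → Spec_waysToSplit nums (waysToSplit nums)

-- ===== LEMMAS AND PROOFS =====

/-- Running prefix sums of `l` starting from accumulated value `s`. -/
def presum : List Int → Int → List Int
  | [], _ => []
  | v :: vs, s => (s + v) :: presum vs (s + v)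

/-- The 0/1 indicator of a valid (left cut i, middle cut j) pair, over prefix list `P` and total `T`. -/
def eN (P : List Int) (T : Int) (i j : Nat) : Int :=
  if 2 * P.getD i 0 ≤ P.getD j 0 ∧ 2 * P.getD j 0 - T ≤ P.getD i 0 then 1 else 0

/-- B's per-iteration count at middle cut `j`. -/
def cB (P : List Int) (T : Int) (j : Nat) : Int :=
  let lo := 2 * P.getD j 0 - T
  let hi := PySem.Int.floordiv (P.getD j 0) 2
  if lo ≤ hi then
    ((P.take j).countP (fun e => decide (lo ≤ e) && decide (e ≤ hi)) : Int)
  else 0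

theorem presum_length (l : List Int) (s : Int) : (presum l s).length = l.length := by
  induction l generalizing s with
  | nil => simp [presum]
  | cons v vs ih => simp [presum, ih]

theorem foldlA_prefix (l : List Int) (acc : List Int) (h : acc ≠ []) :
    l.foldl (fun p i => p ++ [PySem.List.pyGetD p (-1) 0 + i]) acc
      = acc ++ presum l (acc.getLast h) := by
  induction l generalizing acc with
  | nil => simp [presum]
  | cons v vs ih =>
    rw [List.foldl_cons, PySem.List.pyGetD_neg_one acc _ h, ih _ (by simp)]
    simp [presum]

theorem foldlB_prefix (l : List Int) (s : Int) (acc : List Int) :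
    l.foldl (fun (a : Int × List Int) v => (a.1 + v, a.2 ++ [a.1 + v])) (s, acc)
      = (s + l.sum, acc ++ presum l s) := by
  induction l generalizing s acc with
  | nil => simp [presum]
  | cons v vs ih => rw [List.foldl_cons]; simp [ih, presum]; ring

/-- A sorted list split at `r` with everything before satisfying `p` and nothing from `r` on:
`r` is the count of elements satisfying `p`. -/
theorem bisect_count_core (xs : List Int) (p : Int → Bool) (r : Nat)
    (hle : r ≤ xs.length)
    (hlt : ∀ (j : Nat) (hj : j < xs.length), j < r → p xs[j] = true)
    (hge : ∀ (j : Nat) (hj : j < xs.length), r ≤ j → p xs[j] = false) :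
    r = xs.countP p := by
  conv_rhs => rw [← List.take_append_drop r xs]
  rw [List.countP_append]
  have h1 : (xs.take r).countP p = (xs.take r).length := by
    rw [List.countP_eq_length]
    intro a ha
    rw [List.mem_take_iff_getElem] at ha
    obtain ⟨j, hj, rfl⟩ := ha
    exact hlt j (by omega) (by omega)
  have h2 : (xs.drop r).countP p = 0 := by
    rw [List.countP_eq_zero]
    intro a ha
    rw [List.mem_drop_iff_getElem] at ha
    obtain ⟨j, hj, rfl⟩ := ha
    simp [hge (r + j) (by omega) (by omega)]
  rw [h1, h2, List.length_take]
  omega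

theorem bisectLeft_eq (xs : List Int) (x : Int) (h : xs.Pairwise (· ≤ ·)) :
    PySem.List.bisectLeft xs x = xs.countP (fun e => decide (e < x)) := by
  obtain ⟨hle, hlt, hge⟩ := PySem.List.bisectLeft_spec xs x h
  exact bisect_count_core xs _ _ hle
    (fun j hj hjr => by simp [hlt j hj hjr])
    (fun j hj hjr => by simp [hge j hj hjr, not_lt])

theorem bisectRight_eq (xs : List Int) (x : Int) (h : xs.Pairwise (· ≤ ·)) :
    PySem.List.bisectRight xs x = xs.countP (fun e => decide (e ≤ x)) := by
  obtain ⟨hle, hlt, hge⟩ := PySem.List.bisectRight_spec xs x h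
  exact bisect_count_core xs _ _ hle
    (fun j hj hjr => by simp [hlt j hj hjr])
    (fun j hj hjr => by simpa [not_le] using hge j hj hjr)

theorem insert_bisect_sorted (xs : List Int) (x : Int) (h : xs.Pairwise (· ≤ ·)) :
    (PySem.List.insert xs ((PySem.List.bisectLeft xs x : Nat) : Int) x).Pairwise (· ≤ ·)
    ∧ (PySem.List.insert xs ((PySem.List.bisectLeft xs x : Nat) : Int) x).Perm (x :: xs) := by
  obtain ⟨hle, hlt, hge⟩ := PySem.List.bisectLeft_spec xs x h
  rw [PySem.List.insert_natCast xs _ x hle]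
  constructor
  · rw [List.pairwise_append]
    refine ⟨List.Pairwise.sublist (List.take_sublist _ _) h, ?_, ?_⟩
    · rw [List.pairwise_cons]
      refine ⟨?_, List.Pairwise.sublist (List.drop_sublist _ _) h⟩
      intro b hb
      rw [List.mem_drop_iff_getElem] at hb
      obtain ⟨j, hj, rfl⟩ := hb
      exact hge _ (by omega) (by omega)
    · intro a ha b hb
      rw [List.mem_take_iff_getElem] at ha
      obtain ⟨j, hj, rfl⟩ := ha
      have hax : xs[j] < x := hlt j (by omega) (by omega)
      rcases List.mem_cons.mp hb with rfl | hb
      · exact le_of_lt hax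
      · rw [List.mem_drop_iff_getElem] at hb
        obtain ⟨k, hk, rfl⟩ := hb
        exact le_trans (le_of_lt hax) (hge _ (by omega) (by omega))
  · have hp := @List.perm_middle _ x (List.take (PySem.List.bisectLeft xs x) xs)
        (List.drop (PySem.List.bisectLeft xs x) xs)
    rwa [List.take_append_drop] at hp

theorem countP_split (l : List Int) (lo hi : Int) (h : lo ≤ hi) :
    l.countP (fun e => decide (e ≤ hi))
      = l.countP (fun e => decide (e < lo)) + l.countP (fun e => decide (lo ≤ e) && decide (e ≤ hi)) := by
  induction l with
  | nil => simp
  | cons a t ih =>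
    simp only [List.countP_cons, ih]
    by_cases h1 : a ≤ hi <;> by_cases h2 : a < lo <;> by_cases h3 : lo ≤ a <;>
      simp [h1, h2, h3] <;> omega

theorem countP_take_eq_sum (l : List Int) (p : Int → Bool) (m : Nat) (hm : m ≤ l.length) :
    (((l.take m).countP p : Nat) : Int)
      = ∑ i ∈ Finset.range m, (if p (l.getD i 0) = true then (1 : Int) else 0) := by
  induction m with
  | zero => simp
  | succ k ih =>
    have hk : k < l.length := by omega
    rw [List.take_add_one, List.countP_append, Finset.sum_range_succ, ← ih (by omega)]
    have h2 : l[k]? = some l[k] := by simp [hk]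
    simp [h2, List.countP_cons, List.getD_eq_getElem?_getD]

theorem countP_pyRange_sum (a b : Int) (p : Int → Bool) :
    ((PySem.List.pyRange a b 1).countP p : Int)
      = ∑ t ∈ Finset.range (b - a).toNat, (if p (a + (t : Int)) = true then (1 : Int) else 0) := by
  rw [PySem.List.pyRange_one, List.countP_map]
  rw [← PySem.List.sum_map_ite_one_zero ((p ∘ fun (k : Nat) => a + (k : Int)))
      (List.range (b - a).toNat)]
  rfl

theorem swap_lemma (M : Nat) (f : Nat → Nat → Int) :
    ∑ k ∈ Finset.range M, ∑ t ∈ Finset.range (M - k), f k (k + 1 + t)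
      = ∑ t ∈ Finset.range M, ∑ i ∈ Finset.range (t + 1), f i (t + 1) := by
  have h1 : ∀ k, ∑ t ∈ Finset.range (M - k), f k (k + 1 + t)
      = ∑ j ∈ Finset.Ico (k + 1) (M + 1), f k j := by
    intro k
    rw [Finset.sum_Ico_eq_sum_range]
    have h2 : M + 1 - (k + 1) = M - k := by omega
    rw [h2]
  calc ∑ k ∈ Finset.range M, ∑ t ∈ Finset.range (M - k), f k (k + 1 + t)
      = ∑ k ∈ Finset.range (M + 1), ∑ j ∈ Finset.Ico (k + 1) (M + 1), f k j := by
        rw [Finset.sum_range_succ, Finset.Ico_self, Finset.sum_empty, add_zero]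
        exact Finset.sum_congr rfl (fun k _ => h1 k)
    _ = ∑ j ∈ Finset.Ico 0 (M + 1), ∑ i ∈ Finset.Ico 0 j, f i j := by
        rw [Finset.range_eq_Ico]
        exact Finset.sum_Ico_Ico_comm' 0 (M + 1) f
    _ = ∑ j ∈ Finset.range (M + 1), ∑ i ∈ Finset.range j, f i j := by
        simp
    _ = ∑ t ∈ Finset.range M, ∑ i ∈ Finset.range (t + 1), f i (t + 1) := by
        rw [Finset.sum_range_succ']
        simp

theorem B_loop (P : List Int) (T : Int) (m : Nat) (hm : m ≤ P.length) (res0 : Int) :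
    ∃ s : List Int,
      (PySem.List.pyRange 1 (1 + (m : Int)) 1).foldl (fun (st : Int × List Int) j =>
        let x := PySem.List.pyGetD P (j - 1) 0
        let seen := PySem.List.insert st.2 ((PySem.List.bisectLeft st.2 x : Nat) : Int) x
        let lo := 2 * PySem.List.pyGetD P j 0 - T
        let hi := PySem.Int.floordiv (PySem.List.pyGetD P j 0) 2
        if lo ≤ hi then
          (st.1 + (((PySem.List.bisectRight seen hi : Nat) : Int)
                    - ((PySem.List.bisectLeft seen lo : Nat) : Int)), seen)
        else (st.1, seen)) ((res0 : Int), ([] : List Int))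
      = (res0 + ∑ t ∈ Finset.range m, cB P T (t + 1), s)
      ∧ s.Pairwise (· ≤ ·) ∧ s.Perm (P.take m) := by
  induction m with
  | zero =>
    refine ⟨[], ?_, List.Pairwise.nil, by simp⟩
    rw [show ((1 : Int) + ((0 : Nat) : Int)) = 1 by norm_num,
        PySem.List.pyRange_one_eq_nil (by norm_num)]
    simp
  | succ m ih =>
    obtain ⟨s, hfold, hsort, hperm⟩ := ih (by omega)
    have hm1 : (1 : Int) + (((m + 1) : Nat) : Int) = (1 + (m : Int)) + 1 := by push_cast; ring
    rw [hm1, PySem.List.pyRange_one_succ_right (by omega), List.foldl_append, hfold,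
        List.foldl_cons, List.foldl_nil]
    have hx : PySem.List.pyGetD P (1 + (m : Int) - 1) 0 = P.getD m 0 := by
      rw [show (1 + (m : Int) - 1) = ((m : Nat) : Int) by ring,
          PySem.List.pyGetD_natCast]
    have hj : PySem.List.pyGetD P (1 + (m : Int)) 0 = P.getD (m + 1) 0 := by
      rw [show (1 + (m : Int)) = (((m + 1) : Nat) : Int) by push_cast; ring,
          PySem.List.pyGetD_natCast]
    simp only [hx, hj]
    obtain ⟨hsort', hperm'⟩ := insert_bisect_sorted s (P.getD m 0) hsort
    set seen := PySem.List.insert s ((PySem.List.bisectLeft s (P.getD m 0) : Nat) : Int)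
        (P.getD m 0) with hseen
    have hpermTake : seen.Perm (P.take (m + 1)) := by
      have h2 : P.take (m + 1) = P.take m ++ [P.getD m 0] := by
        rw [List.take_add_one]
        have hmlt : m < P.length := by omega
        simp [hmlt, List.getD_eq_getElem?_getD]
      rw [h2]
      exact (hperm'.trans (hperm.cons _)).trans (List.perm_append_singleton _ _).symm
    refine ⟨seen, ?_, hsort', hpermTake⟩
    by_cases hlh : 2 * P.getD (m + 1) 0 - T ≤ PySem.Int.floordiv (P.getD (m + 1) 0) 2
    · rw [if_pos hlh]
      have hcount : ((PySem.List.bisectRight seen (PySem.Int.floordiv (P.getD (m + 1) 0) 2) : Nat) : Int)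
          - ((PySem.List.bisectLeft seen (2 * P.getD (m + 1) 0 - T) : Nat) : Int)
          = cB P T (m + 1) := by
        rw [bisectRight_eq seen _ hsort', bisectLeft_eq seen _ hsort',
            hpermTake.countP_eq, hpermTake.countP_eq,
            countP_split (P.take (m + 1)) _ _ hlh]
        unfold cB
        rw [if_pos hlh]
        push_cast
        ring
      rw [hcount, Finset.sum_range_succ, add_assoc]
    · rw [if_neg hlh, Finset.sum_range_succ]
      have hzero : cB P T (m + 1) = 0 := by unfold cB; rw [if_neg hlh]
      rw [hzero, add_zero]

theorem cB_eq_sum (P : List Int) (T : Int) (j : Nat) (hj : j ≤ P.length) :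
    cB P T j = ∑ i ∈ Finset.range j, eN P T i j := by
  unfold cB
  by_cases hc : 2 * P.getD j 0 - T ≤ PySem.Int.floordiv (P.getD j 0) 2
  · rw [if_pos hc, countP_take_eq_sum _ _ j hj]
    refine Finset.sum_congr rfl (fun i _ => ?_)
    unfold eN
    have hiff : (2 * P.getD j 0 - T ≤ P.getD i 0 ∧ P.getD i 0 ≤ PySem.Int.floordiv (P.getD j 0) 2)
        ↔ (2 * P.getD i 0 ≤ P.getD j 0 ∧ 2 * P.getD j 0 - T ≤ P.getD i 0) := by
      rw [PySem.Int.le_floordiv_iff_mul_le (by norm_num)]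
      constructor <;> intro ⟨ha, hb⟩ <;> constructor <;> omega
    have hb : ((decide (2 * P.getD j 0 - T ≤ P.getD i 0)
          && decide (P.getD i 0 ≤ PySem.Int.floordiv (P.getD j 0) 2)) = true)
        ↔ (2 * P.getD i 0 ≤ P.getD j 0 ∧ 2 * P.getD j 0 - T ≤ P.getD i 0) := by
      rw [Bool.and_eq_true, decide_eq_true_eq, decide_eq_true_eq]
      exact hiff
    by_cases hgood : 2 * P.getD i 0 ≤ P.getD j 0 ∧ 2 * P.getD j 0 - T ≤ P.getD i 0
    · rw [if_pos hgood, if_pos (hb.mpr hgood)]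
    · rw [if_neg hgood, if_neg (fun hx => hgood (hb.mp hx))]
  · rw [if_neg hc]
    refine (Finset.sum_eq_zero (fun i _ => ?_)).symm
    unfold eN
    rw [if_neg]
    intro ⟨h1, h2⟩
    apply hc
    have h3 : P.getD i 0 ≤ PySem.Int.floordiv (P.getD j 0) 2 := by
      rw [PySem.Int.le_floordiv_iff_mul_le (by norm_num)]; omega
    omega

theorem A_fold_eq (P : List Int) (T : Int) (N : Nat) :
    (PySem.List.pyRange 0 ((N : Int) - 2) 1).foldl (fun res i =>
        (PySem.List.pyRange (i + 1) ((N : Int) - 1) 1).foldl (fun res j =>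
          if PySem.List.pyGetD P i 0 ≤ PySem.List.pyGetD P j 0 - PySem.List.pyGetD P i 0 ∧
             PySem.List.pyGetD P j 0 - PySem.List.pyGetD P i 0 ≤
               T - PySem.List.pyGetD P i 0 - (PySem.List.pyGetD P j 0 - PySem.List.pyGetD P i 0)
          then res + 1 else res) res) 0
    = ∑ t ∈ Finset.range (N - 2), ∑ i ∈ Finset.range (t + 1), eN P T i (t + 1) := by
  have h1 : (PySem.List.pyRange 0 ((N : Int) - 2) 1).foldl (fun res i =>
        (PySem.List.pyRange (i + 1) ((N : Int) - 1) 1).foldl (fun res j =>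
          if PySem.List.pyGetD P i 0 ≤ PySem.List.pyGetD P j 0 - PySem.List.pyGetD P i 0 ∧
             PySem.List.pyGetD P j 0 - PySem.List.pyGetD P i 0 ≤
               T - PySem.List.pyGetD P i 0 - (PySem.List.pyGetD P j 0 - PySem.List.pyGetD P i 0)
          then res + 1 else res) res) 0
      = (PySem.List.pyRange 0 ((N : Int) - 2) 1).foldl (fun res i => res +
          ((PySem.List.pyRange (i + 1) ((N : Int) - 1) 1).countP (fun j =>
            decide (PySem.List.pyGetD P i 0 ≤ PySem.List.pyGetD P j 0 - PySem.List.pyGetD P i 0 ∧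
              PySem.List.pyGetD P j 0 - PySem.List.pyGetD P i 0 ≤
                T - PySem.List.pyGetD P i 0 -
                  (PySem.List.pyGetD P j 0 - PySem.List.pyGetD P i 0))) : Int)) 0 :=
    PySem.List.foldl_congr_mem _ _ _ _ (fun acc i _ => PySem.List.foldl_ite_add_one _ _ acc)
  rw [h1, PySem.List.foldl_add, zero_add, PySem.List.pyRange_one, List.map_map]
  have hM : ((N : Int) - 2 - 0).toNat = N - 2 := by omega
  rw [hM]
  have hbridge : ∀ (n : Nat) (f : Nat → Int),
      ((List.range n).map f).sum = ∑ i ∈ Finset.range n, f i := fun n f => rfl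
  rw [hbridge]
  refine (Finset.sum_congr rfl (fun k hk => ?_)).trans (swap_lemma (N - 2) (eN P T))
  have hk' : k < N - 2 := Finset.mem_range.mp hk
  simp only [Function.comp_apply]
  rw [countP_pyRange_sum]
  have ht : ((N : Int) - 1 - (0 + (k : Int) + 1)).toNat = N - 2 - k := by omega
  rw [ht]
  refine Finset.sum_congr rfl (fun t ht' => ?_)
  have e1 : PySem.List.pyGetD P (0 + (k : Int)) 0 = P.getD k 0 := by
    rw [show (0 + (k : Int)) = ((k : Nat) : Int) by ring, PySem.List.pyGetD_natCast]
  have e2 : PySem.List.pyGetD P (0 + (k : Int) + 1 + (t : Int)) 0 = P.getD (k + 1 + t) 0 := by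
    rw [show (0 + (k : Int) + 1 + (t : Int)) = (((k + 1 + t) : Nat) : Int) by push_cast; ring,
        PySem.List.pyGetD_natCast]
  simp only [e1, e2, decide_eq_true_eq]
  unfold eN
  have hxy : (P.getD k 0 ≤ P.getD (k + 1 + t) 0 - P.getD k 0 ∧
        P.getD (k + 1 + t) 0 - P.getD k 0 ≤
          T - P.getD k 0 - (P.getD (k + 1 + t) 0 - P.getD k 0))
      ↔ (2 * P.getD k 0 ≤ P.getD (k + 1 + t) 0 ∧
         2 * P.getD (k + 1 + t) 0 - T ≤ P.getD k 0) := by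
    constructor <;> intro ⟨ha, hb⟩ <;> constructor <;> omega
  exact if_congr hxy rfl rfl

theorem B_fold_eq (P : List Int) (T : Int) (N : Nat) (hN : 1 ≤ N) (hNP : P.length = N) :
    ((PySem.List.pyRange 1 ((N : Int) - 1) 1).foldl (fun (st : Int × List Int) j =>
        let x := PySem.List.pyGetD P (j - 1) 0
        let seen := PySem.List.insert st.2 ((PySem.List.bisectLeft st.2 x : Nat) : Int) x
        let lo := 2 * PySem.List.pyGetD P j 0 - T
        let hi := PySem.Int.floordiv (PySem.List.pyGetD P j 0) 2
        if lo ≤ hi then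
          (st.1 + (((PySem.List.bisectRight seen hi : Nat) : Int)
                    - ((PySem.List.bisectLeft seen lo : Nat) : Int)), seen)
        else (st.1, seen)) ((0 : Int), ([] : List Int))).1
    = ∑ t ∈ Finset.range (N - 2), cB P T (t + 1) := by
  rcases Nat.eq_or_lt_of_le hN with h1 | h2
  · rw [show ((N : Int) - 1) = 0 by omega, PySem.List.pyRange_one_eq_nil (by norm_num)]
    simp [show N - 2 = 0 by omega]
  · have hcast : ((N : Int) - 1) = 1 + ((N - 2 : Nat) : Int) := by omega
    rw [hcast]
    obtain ⟨s, hfold, _, _⟩ := B_loop P T (N - 2) (by omega) 0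
    rw [hfold, zero_add]

-- ===== VERDICT (by name: the statement is the Claim_ definition above) =====
theorem waysToSplit_spec : Claim_equal_waysToSplit := by
  intro nums _ hpre
  unfold Spec_waysToSplit
  obtain ⟨v, vs, rfl⟩ := List.exists_cons_of_ne_nil hpre
  have hP0 : presum (v :: vs) 0 = v :: presum vs v := by simp [presum]
  have hPlen : (v :: presum vs v).length = vs.length + 1 := by
    simp [presum_length]
  simp only [waysToSplit, waysToSplit_alt, PySem.List.len_eq, List.length_cons,
    PySem.List.slice_from_one, List.tail_cons, PySem.List.pyGet?_zero_cons, Option.getD_some,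
    foldlB_prefix, List.nil_append, hP0]
  rw [foldlA_prefix vs [v] (by simp)]
  simp only [List.getLast_singleton, List.singleton_append]
  congr 1
  refine Eq.trans
    (A_fold_eq (v :: presum vs v) (PySem.List.pyGetD (v :: presum vs v) (-1) 0) (vs.length + 1))
    (Eq.trans ?_
      (B_fold_eq (v :: presum vs v) (PySem.List.pyGetD (v :: presum vs v) (-1) 0) (vs.length + 1)
        (by omega) hPlen).symm)
  exact Finset.sum_congr rfl (fun t ht => (cB_eq_sum _ _ (t + 1) (by
    have h1 := Finset.mem_range.mp ht
    rw [hPlen]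
    omega)).symm)
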